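-- pv_equiv track=rewrite | github.com/RikishK/Social_Distancing_Estimator | main.py | too_close_cull_duplicates
-- ===== SOURCE A (Python) =====
-- def check_equal(person, other_person):
--     return person[0][0] == other_person[0][0] and person[0][1] == other_person[0][1]
--
-- def too_close_cull_duplicates(too_close):
--     pos = 0
--     codes = []
--     for member in too_close:
--         person, other_person = member[0]
--         code = 0
--         if(pos < len(too_close) - 1):
--             for other_member in too_close[pos + 1:]:
--                 if (other_member):
--                     other_member_person, other_member_other_person = other_member[0]
--                     if (check_equal(person, other_member_other_person)) and (
--                     check_equal(other_person, other_member_person)):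
--                         code = 1
--         codes.append(code)
--         pos = pos + 1
--     return codes
-- ===== SOURCE B (Python) =====
-- def _key(p):
--     return tuple(p[0][:2]) if p else ()
--
-- def too_close_cull_duplicates(too_close):
--     seen = set()
--     rev_codes = []
--     for member in reversed(too_close):
--         person, other_person = member[0]
--         kp = _key(person)
--         kq = _key(other_person)
--         rev_codes.append(1 if (kq, kp) in seen else 0)
--         seen.add((kp, kq))
--     rev_codes.reverse()
--     return rev_codes
-- ===== Notes on version B (the rewrite author's own statement) =====
-- stated objective: faster
-- what changed: Replaced the quadratic scan of all later members for each member by a single backward pass that keeps a hash set of the (person-key, other-key) pairs already seen, so each member's reversed-pair lookup is O(1).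
import Mathlib
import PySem

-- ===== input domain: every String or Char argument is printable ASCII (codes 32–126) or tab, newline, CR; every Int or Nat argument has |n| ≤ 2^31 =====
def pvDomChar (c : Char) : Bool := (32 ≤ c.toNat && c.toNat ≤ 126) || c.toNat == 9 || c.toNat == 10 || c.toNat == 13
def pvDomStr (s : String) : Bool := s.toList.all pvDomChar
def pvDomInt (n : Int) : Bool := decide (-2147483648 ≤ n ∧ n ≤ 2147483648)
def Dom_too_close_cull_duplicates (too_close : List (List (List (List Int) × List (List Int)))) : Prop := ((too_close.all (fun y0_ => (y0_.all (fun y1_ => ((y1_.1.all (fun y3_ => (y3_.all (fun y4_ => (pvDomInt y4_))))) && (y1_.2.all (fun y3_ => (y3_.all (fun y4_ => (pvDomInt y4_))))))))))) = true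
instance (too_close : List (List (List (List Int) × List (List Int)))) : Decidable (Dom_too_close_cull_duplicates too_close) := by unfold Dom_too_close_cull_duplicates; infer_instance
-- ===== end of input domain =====

-- B replaces A's quadratic scan over all later members by one backward pass with a hash
-- set of key pairs already seen (objective: faster, asymptotic O(n^2) → O(n)).

-- ===== PORT A =====
-- p[0][j] with a total `.getD` fallback; only reached inside Pre_, where the index exists
def pvIdx (p : List (List Int)) (j : Int) : Int :=
  (PySem.List.pyGet? ((PySem.List.pyGet? p 0).getD []) j).getD 0

def pvCheckEqual (person other_person : List (List Int)) : Bool :=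
  pvIdx person 0 == pvIdx other_person 0 && pvIdx person 1 == pvIdx other_person 1

def too_close_cull_duplicates (too_close : List (List (List (List Int) × List (List Int)))) : List Int :=
  (too_close.foldl (fun (st : Int × List Int) member =>
    let pos := st.1
    let pr := (PySem.List.pyGet? member 0).getD ([], [])
    let code : Int :=
      if pos < (too_close.length : Int) - 1 then
        (PySem.List.slice too_close (some (pos + 1)) none).foldl (fun (code : Int) other_member =>
          if other_member ≠ [] then
            let opr := (PySem.List.pyGet? other_member 0).getD ([], [])
            if pvCheckEqual pr.1 opr.2 && pvCheckEqual pr.2 opr.1 then 1 else code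
          else code) 0
      else 0
    (pos + 1, st.2 ++ [code])) ((0 : Int), ([] : List Int))).2

-- ===== PORT B =====
-- _key(p) = tuple(p[0][:2]) if p else ()   (a tuple of ≤ 2 ints, ported as List Int)
def pvKeyB (p : List (List Int)) : List Int :=
  if p ≠ [] then PySem.List.slice ((PySem.List.pyGet? p 0).getD []) none (some 2) else []

def too_close_cull_duplicates_alt (too_close : List (List (List (List Int) × List (List Int)))) : List Int :=
  (too_close.reverse.foldl
    (fun (st : PySem.Set (List Int × List Int) × List Int) member =>
      let pr := (PySem.List.pyGet? member 0).getD ([], [])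
      let kp := pvKeyB pr.1
      let kq := pvKeyB pr.2
      let c : Int := if PySem.Set.contains st.1 (kq, kp) then 1 else 0
      (PySem.Set.add st.1 (kp, kq), st.2 ++ [c]))
    (PySem.Set.empty, ([] : List Int))).2.reverse

-- ===== PRECONDITION & SPEC =====
-- the first comparison of check_equal(p, q) reads p[0][0] and q[0][0]; the second reads
-- p[0][1] and q[0][1] and is only reached when the first coordinates agree
def pvOk1 (p q : List (List Int)) : Prop :=
  p ≠ [] ∧ q ≠ [] ∧ p.headI ≠ [] ∧ q.headI ≠ [] ∧
    (p.headI.headI = q.headI.headI → 2 ≤ p.headI.length ∧ 2 ≤ q.headI.length)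

-- member m (earlier) can be compared with member om (later) without an IndexError:
-- check_equal(person, other_om) always runs; check_equal(other, person_om) only if it was True
def pvPairOk (m om : List (List (List Int) × List (List Int))) : Prop :=
  pvOk1 m.headI.1 om.headI.2 ∧
    ((m.headI.1.headI.headI = om.headI.2.headI.headI ∧
      m.headI.1.headI.getD 1 0 = om.headI.2.headI.getD 1 0) → pvOk1 m.headI.2 om.headI.1)

-- exactly the inputs on which Python A returns: every member is nonempty and every ordered
-- pair of members can be compared without an IndexError
def Pre_too_close_cull_duplicates (too_close : List (List (List (List Int) × List (List Int)))) : Prop :=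
  (∀ m ∈ too_close, m ≠ []) ∧ too_close.Pairwise pvPairOk
instance (too_close : List (List (List (List Int) × List (List Int)))) : Decidable (Pre_too_close_cull_duplicates too_close) := by unfold Pre_too_close_cull_duplicates pvPairOk pvOk1; infer_instance

def pvWitness_too_close_cull_duplicates : (List (List (List (List Int) × List (List Int)))) :=
  [[([[1, 2]], [[3, 4]])], [([[3, 4]], [[1, 2]])]]

def Spec_too_close_cull_duplicates (too_close : List (List (List (List Int) × List (List Int)))) (out : List Int) : Prop := out = too_close_cull_duplicates_alt too_close
instance (too_close : List (List (List (List Int) × List (List Int)))) (out : List Int) : Decidable (Spec_too_close_cull_duplicates too_close out) := by unfold Spec_too_close_cull_duplicates; infer_instance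

-- ===== CLAIM (what is proved, stated in full; the proofs are below) =====
def Claim_equal_too_close_cull_duplicates : Prop := ∀ (too_close : List (List (List (List Int) × List (List Int)))), Dom_too_close_cull_duplicates too_close → Pre_too_close_cull_duplicates too_close → Spec_too_close_cull_duplicates too_close (too_close_cull_duplicates too_close)


-- ===== LEMMAS AND PROOFS =====

-- the member type, the key-pair type
abbrev PVM := List (List (List Int) × List (List Int))
abbrev PVK := List Int × List Int

def pvKeys (m : PVM) : PVK :=
  let pr := (PySem.List.pyGet? m 0).getD ([], [])
  (pvKeyB pr.1, pvKeyB pr.2)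

-- A's inner-loop condition for current member m against a later member om
def pvHit (m om : PVM) : Bool :=
  decide (om ≠ []) &&
    (pvCheckEqual ((PySem.List.pyGet? m 0).getD ([], [])).1 ((PySem.List.pyGet? om 0).getD ([], [])).2 &&
     pvCheckEqual ((PySem.List.pyGet? m 0).getD ([], [])).2 ((PySem.List.pyGet? om 0).getD ([], [])).1)

-- common reference result
def pvSpecA : List PVM → List Int
  | [] => []
  | m :: t => (if t.any (pvHit m) then (1 : Int) else 0) :: pvSpecA t

theorem pvInnerFold (m : PVM) :
    ∀ (l : List PVM) (s : Int),
      l.foldl (fun (code : Int) other_member =>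
          if other_member ≠ [] then
            let opr := (PySem.List.pyGet? other_member 0).getD ([], [])
            if pvCheckEqual ((PySem.List.pyGet? m 0).getD ([], [])).1 opr.2 &&
               pvCheckEqual ((PySem.List.pyGet? m 0).getD ([], [])).2 opr.1 then 1 else code
          else code) s
        = if l.any (pvHit m) then 1 else s := by
  intro l
  induction l with
  | nil => intro s; simp
  | cons om t ih =>
    intro s
    simp only [List.foldl_cons, ih, List.any_cons]
    by_cases hne : om ≠ []
    · by_cases hc : (pvCheckEqual ((PySem.List.pyGet? m 0).getD ([], [])).1 ((PySem.List.pyGet? om 0).getD ([], [])).2 &&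
          pvCheckEqual ((PySem.List.pyGet? m 0).getD ([], [])).2 ((PySem.List.pyGet? om 0).getD ([], [])).1) = true
      · have hh : pvHit m om = true := by simp [pvHit, hne, hc]
        simp [hne, hc, hh]
      · rw [Bool.not_eq_true] at hc
        have hh : pvHit m om = false := by simp [pvHit, hc]
        simp [hne, hc, hh]
    · have hh : pvHit m om = false := by simp [pvHit, hne]
      simp [if_neg hne, hh]

theorem pvAFold (tc : List PVM) :
    ∀ (rest pre : List PVM) (acc : List Int), tc = pre ++ rest →
      (rest.foldl (fun (st : Int × List Int) member =>
        let pos := st.1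
        let pr := (PySem.List.pyGet? member 0).getD ([], [])
        let code : Int :=
          if pos < (tc.length : Int) - 1 then
            (PySem.List.slice tc (some (pos + 1)) none).foldl (fun (code : Int) other_member =>
              if other_member ≠ [] then
                let opr := (PySem.List.pyGet? other_member 0).getD ([], [])
                if pvCheckEqual pr.1 opr.2 && pvCheckEqual pr.2 opr.1 then 1 else code
              else code) 0
          else 0
        (pos + 1, st.2 ++ [code])) (((pre.length : Nat) : Int), acc)).2 = acc ++ pvSpecA rest := by
  intro rest
  induction rest with
  | nil => intro pre acc _; simp [pvSpecA]
  | cons m t ih =>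
    intro pre acc htc
    have hsl : PySem.List.slice tc (some (((pre.length : Nat) : Int) + 1)) none = t := by
      have h1 : (((pre.length : Nat) : Int) + 1) = (((pre.length + 1 : Nat)) : Int) := by push_cast; ring
      rw [h1, PySem.List.slice_from_natCast, htc]
      have : pre ++ m :: t = (pre ++ [m]) ++ t := by simp
      rw [this]
      have h2 : pre.length + 1 = (pre ++ [m]).length := by simp
      rw [h2, List.drop_left]
    have hcode :
        (if (((pre.length : Nat) : Int)) < (tc.length : Int) - 1 then
            (PySem.List.slice tc (some (((pre.length : Nat) : Int) + 1)) none).foldl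
              (fun (code : Int) other_member =>
                if other_member ≠ [] then
                  let opr := (PySem.List.pyGet? other_member 0).getD ([], [])
                  if pvCheckEqual ((PySem.List.pyGet? m 0).getD ([], [])).1 opr.2 &&
                     pvCheckEqual ((PySem.List.pyGet? m 0).getD ([], [])).2 opr.1 then 1 else code
                else code) 0
          else 0) = if t.any (pvHit m) then (1 : Int) else 0 := by
      by_cases hg : (((pre.length : Nat) : Int)) < (tc.length : Int) - 1
      · rw [if_pos hg, hsl, pvInnerFold]
      · rw [if_neg hg]
        have hlen : tc.length = pre.length + 1 + t.length := by rw [htc]; simp; omega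
        have ht : t = [] := by
          rw [hlen] at hg
          push_cast at hg
          have : t.length = 0 := by omega
          exact List.length_eq_zero_iff.mp this
        simp [ht]
    simp only [List.foldl_cons]
    have hcast : ((pre.length : Nat) : Int) + 1 = (((pre ++ [m]).length : Nat) : Int) := by
      simp
    rw [hcode, hcast, ih (pre ++ [m]) (acc ++ [if t.any (pvHit m) then (1 : Int) else 0]) (by simp [htc])]
    simp [pvSpecA]

-- B's backward pass, characterized
def pvBCodes : List PVM → PySem.Set PVK → List Int
  | [], _ => []
  | m :: t, S =>
      (if PySem.Set.contains S ((pvKeys m).2, (pvKeys m).1) then (1 : Int) else 0)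
        :: pvBCodes t (PySem.Set.add S (pvKeys m))

theorem pvBFold :
    ∀ (l : List PVM) (S : PySem.Set PVK) (acc : List Int),
      (l.foldl
        (fun (st : PySem.Set PVK × List Int) member =>
          let pr := (PySem.List.pyGet? member 0).getD ([], [])
          let kp := pvKeyB pr.1
          let kq := pvKeyB pr.2
          let c : Int := if PySem.Set.contains st.1 (kq, kp) then 1 else 0
          (PySem.Set.add st.1 (kp, kq), st.2 ++ [c])) (S, acc)).2
        = acc ++ pvBCodes l S := by
  intro l
  induction l with
  | nil => intro S acc; simp [pvBCodes]
  | cons m t ih =>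
    intro S acc
    simp only [List.foldl_cons]
    rw [ih]
    simp [pvBCodes, pvKeys]

theorem pvBCodes_append (l : List PVM) (m : PVM) :
    ∀ S, pvBCodes (l ++ [m]) S
      = pvBCodes l S ++
        [if PySem.Set.contains (l.foldl (fun s x => PySem.Set.add s (pvKeys x)) S) ((pvKeys m).2, (pvKeys m).1)
         then (1 : Int) else 0] := by
  induction l with
  | nil => intro S; simp [pvBCodes]
  | cons x t ih => intro S; simp [pvBCodes, ih]

theorem pvContains_foldl_add (l : List PVM) (S : PySem.Set PVK) (k : PVK) :
    PySem.Set.contains (l.foldl (fun s x => PySem.Set.add s (pvKeys x)) S) k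
      = (PySem.Set.contains S k || l.any (fun om => pvKeys om == k)) := by
  rw [Bool.eq_iff_iff]
  simp only [Bool.or_eq_true, List.any_eq_true, PySem.Set.contains_iff, beq_iff_eq]
  rw [PySem.Set.mem_foldl_add]
  constructor
  · rintro (h | ⟨b, hb, rfl⟩)
    · exact Or.inl h
    · exact Or.inr ⟨b, hb, rfl⟩
  · rintro (h | ⟨b, hb, rfl⟩)
    · exact Or.inl h
    · exact Or.inr ⟨b, hb, rfl⟩

-- index helpers, under the shape facts of pvOk1
theorem pvGetD_head (m : PVM) (hm : m ≠ []) :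
    (PySem.List.pyGet? m 0).getD ([], []) = m.headI := by
  cases m with
  | nil => exact absurd rfl hm
  | cons x xs => simp

theorem pvIdx_zero (p : List (List Int)) (hp : p ≠ []) (hr : p.headI ≠ []) :
    pvIdx p 0 = p.headI.headI := by
  cases p with
  | nil => exact absurd rfl hp
  | cons r rs =>
    cases r with
    | nil => exact absurd rfl hr
    | cons a as => simp [pvIdx]

theorem pvIdx_one (p : List (List Int)) (hp : p ≠ []) :
    pvIdx p 1 = p.headI.getD 1 0 := by
  cases p with
  | nil => exact absurd rfl hp
  | cons r rs =>
    simp only [pvIdx, PySem.List.pyGet?_zero_cons, Option.getD_some, List.headI_cons]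
    rw [PySem.List.pyGet?_of_nonneg (i := 1) (xs := r) (by norm_num)]
    simp [List.getD_eq_getElem?_getD]

theorem pvKeyB_take (p : List (List Int)) (hp : p ≠ []) :
    pvKeyB p = p.headI.take 2 := by
  cases p with
  | nil => exact absurd rfl hp
  | cons r rs =>
    simp only [pvKeyB, if_pos (by simp : (r :: rs : List (List Int)) ≠ []),
      PySem.List.pyGet?_zero_cons, Option.getD_some, List.headI_cons]
    have h2 : (2 : Int) = ((2 : Nat) : Int) := rfl
    rw [h2, PySem.List.slice_to_natCast]

-- check_equal(p, q) is prefix-key equality, when its reads are in range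
theorem pvCheck_eq_key (p q : List (List Int)) (h : pvOk1 p q) :
    pvCheckEqual p q = (pvKeyB p == pvKeyB q) := by
  obtain ⟨hp, hq, hrp, hrq, hlen⟩ := h
  rw [Bool.eq_iff_iff]
  simp only [pvCheckEqual, Bool.and_eq_true, beq_iff_eq,
    pvIdx_zero p hp hrp, pvIdx_zero q hq hrq, pvIdx_one p hp, pvIdx_one q hq,
    pvKeyB_take p hp, pvKeyB_take q hq]
  cases hrp' : p.headI with
  | nil => exact absurd hrp' hrp
  | cons a as =>
    cases hrq' : q.headI with
    | nil => exact absurd hrq' hrq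
    | cons b bs =>
      rw [hrp', hrq'] at hlen
      by_cases hab : a = b
      · have := hlen (by simp [hab])
        cases as with
        | nil => simp at this
        | cons a1 as' =>
          cases bs with
          | nil => simp at this
          | cons b1 bs' => simp [hab]
      · simp [hab]

theorem pvKey_eq_imp (r s : List Int) (hr : r ≠ []) (hs : s ≠ []) (h : r.take 2 = s.take 2) :
    r.headI = s.headI ∧ r.getD 1 0 = s.getD 1 0 := by
  cases r with
  | nil => exact absurd rfl hr
  | cons a as =>
    cases s with
    | nil => exact absurd rfl hs
    | cons b bs => cases as <;> cases bs <;> simp_all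

-- the hit test is a key-pair comparison, for a pair of members A can compare
theorem pvHit_eq_key (m om : PVM) (hm : m ≠ []) (hom : om ≠ []) (hC : pvPairOk m om) :
    pvHit m om = (pvKeys om == ((pvKeys m).2, (pvKeys m).1)) := by
  obtain ⟨hC1, hC2⟩ := hC
  simp only [pvHit, pvKeys, pvGetD_head m hm, pvGetD_head om hom]
  rw [decide_eq_true hom, Bool.true_and, pvCheck_eq_key _ _ hC1, Bool.eq_iff_iff]
  simp only [Bool.and_eq_true, beq_iff_eq, Prod.ext_iff]
  obtain ⟨hp, hq, hrp, hrq, -⟩ := hC1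
  constructor
  · rintro ⟨h1, h2⟩
    have h1' := h1
    rw [pvKeyB_take _ hp, pvKeyB_take _ hq] at h1'
    have hok2 := hC2 (pvKey_eq_imp _ _ hrp hrq h1')
    rw [pvCheck_eq_key _ _ hok2] at h2
    exact ⟨(beq_iff_eq.mp h2).symm, h1.symm⟩
  · rintro ⟨h1, h2⟩
    have h2' := h2.symm
    rw [pvKeyB_take _ hp, pvKeyB_take _ hq] at h2'
    have hok2 := hC2 (pvKey_eq_imp _ _ hrp hrq h2')
    refine ⟨h2.symm, ?_⟩
    rw [pvCheck_eq_key _ _ hok2]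
    exact beq_iff_eq.mpr h1.symm

theorem pvB_eq_specA (tc : List PVM) (hne : ∀ m ∈ tc, m ≠ []) (hpw : tc.Pairwise pvPairOk) :
    (pvBCodes tc.reverse PySem.Set.empty).reverse = pvSpecA tc := by
  induction tc with
  | nil => simp [pvBCodes, pvSpecA]
  | cons m t ih =>
    have ht : ∀ x ∈ t, x ≠ [] := fun x hx => hne x (List.mem_cons_of_mem _ hx)
    have hm : m ≠ [] := hne m List.mem_cons_self
    rw [List.pairwise_cons] at hpw
    obtain ⟨hCm, hpwt⟩ := hpw
    simp only [List.reverse_cons, pvBCodes_append, List.reverse_append, pvSpecA]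
    rw [ih ht hpwt, pvContains_foldl_add]
    have hS : PySem.Set.contains (PySem.Set.empty (α := PVK)) ((pvKeys m).2, (pvKeys m).1) = false := by
      simp [PySem.Set.empty, PySem.Set.contains]
    rw [hS, Bool.false_or]
    have hany : t.reverse.any (fun om => pvKeys om == ((pvKeys m).2, (pvKeys m).1)) = t.any (pvHit m) := by
      rw [Bool.eq_iff_iff]
      simp only [List.any_eq_true, List.mem_reverse]
      constructor
      · rintro ⟨om, hom, h⟩
        exact ⟨om, hom, by rw [pvHit_eq_key m om hm (ht om hom) (hCm om hom)]; exact h⟩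
      · rintro ⟨om, hom, h⟩
        rw [pvHit_eq_key m om hm (ht om hom) (hCm om hom)] at h
        exact ⟨om, hom, h⟩
    rw [hany]
    simp

-- ===== VERDICT (by name: the statement is the Claim_ definition above) =====
theorem too_close_cull_duplicates_spec : Claim_equal_too_close_cull_duplicates := by
  intro tc _ hpre
  obtain ⟨hne, hpw⟩ := hpre
  unfold Spec_too_close_cull_duplicates
  have hA : too_close_cull_duplicates tc = pvSpecA tc := by
    unfold too_close_cull_duplicates
    have := pvAFold tc tc [] [] (by simp)
    simpa using this
  have hB : too_close_cull_duplicates_alt tc = (pvBCodes tc.reverse PySem.Set.empty).reverse := by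
    unfold too_close_cull_duplicates_alt
    rw [pvBFold]
    simp
  rw [hA, hB, pvB_eq_specA tc hne hpw]
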